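-- pv_equiv track=rewrite | github.com/Ashray04/Python_Practicals_ | PRACTICAL - 05/single_function.py | practical_five
-- ===== SOURCE A (Python) =====
-- def practical_five(s, style):
--     result = ""
--     if style == 'C':  #To upper
--         for char in s:
--             if 'a' <= char <= 'z':
--                 result += chr(ord(char) - 32)
--             else:
--                 result += char
--     elif style == 'L':  #to lower
--         for char in s:
--             if 'A' <= char <= 'Z':
--                 result += chr(ord(char) + 32)
--             else:
--                 result += char
--     elif style == 'R':  #in reverse manner
--         for char in s:
--             if 'a' <= char <= 'z':
--                 result += chr(ord(char) - 32)
--             elif 'A' <= char <= 'Z':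
--                 result += chr(ord(char) + 32)
--             else:
--                 result += char
--     elif style == 'U':  # Zigzag
--         for i in range(len(s)):
--             char = s[i]
--             if i % 2 == 0:
--                 if 'A' <= char <= 'Z':
--                     result += chr(ord(char) + 32)
--                 else:
--                     result += char
--             else:
--                 if 'a' <= char <= 'z':
--                     result += chr(ord(char) - 32)
--                 else:
--                     result += char
--     return result
-- ===== SOURCE B (Python) =====
-- def practical_five(s, style):
--     if style == 'C':
--         return s.upper()
--     if style == 'L':
--         return s.lower()
--     if style == 'R':
--         return s.swapcase()
--     if style == 'U':
--         return ''.join(c.upper() if i % 2 else c.lower() for i, c in enumerate(s))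
--     return ""
-- ===== Notes on version B (the rewrite author's own statement) =====
-- stated objective: idiomatic
-- what changed: Replaces the four explicit character-accumulating loops with per-char ord/chr arithmetic by the standard library case methods upper/lower/swapcase and, for zigzag, a join over enumerate choosing the case by index parity.
import Mathlib
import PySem

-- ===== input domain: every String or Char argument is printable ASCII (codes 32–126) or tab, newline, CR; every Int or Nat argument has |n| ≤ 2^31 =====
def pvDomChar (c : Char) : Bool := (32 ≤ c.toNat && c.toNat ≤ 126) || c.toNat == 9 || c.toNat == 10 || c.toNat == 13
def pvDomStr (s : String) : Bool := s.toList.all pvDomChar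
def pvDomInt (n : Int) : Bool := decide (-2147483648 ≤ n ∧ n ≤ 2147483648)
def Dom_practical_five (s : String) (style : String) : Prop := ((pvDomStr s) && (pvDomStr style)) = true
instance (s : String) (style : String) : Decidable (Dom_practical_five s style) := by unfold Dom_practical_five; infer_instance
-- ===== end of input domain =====

-- B replaces A's explicit case-converting accumulator loops by the standard
-- library case maps (upper / lower / swapcase) and, for the zigzag style, a
-- join over enumerate — idiomatic, not claimed faster.


-- ===== PORT A =====
def practical_five (s : String) (style : String) : String :=
  if style = "C" then
    String.ofList (s.toList.foldl (fun result char =>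
      result ++ [if 'a' ≤ char ∧ char ≤ 'z' then Char.ofNat (char.toNat - 32) else char]) [])
  else if style = "L" then
    String.ofList (s.toList.foldl (fun result char =>
      result ++ [if 'A' ≤ char ∧ char ≤ 'Z' then Char.ofNat (char.toNat + 32) else char]) [])
  else if style = "R" then
    String.ofList (s.toList.foldl (fun result char =>
      result ++ [if 'a' ≤ char ∧ char ≤ 'z' then Char.ofNat (char.toNat - 32)
                 else if 'A' ≤ char ∧ char ≤ 'Z' then Char.ofNat (char.toNat + 32)
                 else char]) [])
  else if style = "U" then
    String.ofList ((PySem.List.pyRange 0 (PySem.List.len s.toList) 1).foldl (fun result i =>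
      let char := PySem.List.pyGetD s.toList i ' '
      result ++ [if i % 2 = 0 then
                   (if 'A' ≤ char ∧ char ≤ 'Z' then Char.ofNat (char.toNat + 32) else char)
                 else
                   (if 'a' ≤ char ∧ char ≤ 'z' then Char.ofNat (char.toNat - 32) else char)]) [])
  else String.ofList []

-- ===== PORT B =====
-- Python str.swapcase, ported by hand (no PySem primitive); exact on the ASCII domain.
def pvSwapChar (c : Char) : Char :=
  if PySem.Chars.isupper c then PySem.Chars.lowerChar c
  else if PySem.Chars.islower c then PySem.Chars.upperChar c
  else c

def practical_five_alt (s : String) (style : String) : String :=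
  if style = "C" then PySem.Str.upper s
  else if style = "L" then PySem.Str.lower s
  else if style = "R" then String.ofList (s.toList.map pvSwapChar)
  else if style = "U" then
    String.ofList ((PySem.List.enumerate s.toList).map (fun p =>
      if p.1 % 2 ≠ 0 then PySem.Chars.upperChar p.2 else PySem.Chars.lowerChar p.2))
  else ""

-- ===== PRECONDITION & SPEC =====
def Spec_practical_five (s : String) (style : String) (out : String) : Prop := out = practical_five_alt s style
instance (s : String) (style : String) (out : String) : Decidable (Spec_practical_five s style out) := by unfold Spec_practical_five; infer_instance

-- ===== CLAIM (what is proved, stated in full; the proofs are below) =====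
def Claim_equal_practical_five : Prop := ∀ (s : String) (style : String), Dom_practical_five s style → Spec_practical_five s style (practical_five s style)

-- ===== LEMMAS AND PROOFS =====
theorem pv_upperChar_eq (c : Char) :
    (if 'a' ≤ c ∧ c ≤ 'z' then Char.ofNat (c.toNat - 32) else c) = PySem.Chars.upperChar c := by
  simp [PySem.Chars.upperChar, PySem.Chars.islower]

theorem pv_lowerChar_eq (c : Char) :
    (if 'A' ≤ c ∧ c ≤ 'Z' then Char.ofNat (c.toNat + 32) else c) = PySem.Chars.lowerChar c := by
  simp [PySem.Chars.lowerChar, PySem.Chars.isupper]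

theorem pv_swapChar_eq (c : Char) :
    (if 'a' ≤ c ∧ c ≤ 'z' then Char.ofNat (c.toNat - 32)
     else if 'A' ≤ c ∧ c ≤ 'Z' then Char.ofNat (c.toNat + 32)
     else c) = pvSwapChar c := by
  simp only [pvSwapChar, PySem.Chars.isupper, PySem.Chars.islower]
  by_cases h1 : 'a' ≤ c ∧ c ≤ 'z'
  · have h2 : ¬('A' ≤ c ∧ c ≤ 'Z') := by
      rintro ⟨_, hb⟩
      exact absurd (le_trans h1.1 hb) (by decide)
    simp [h1, h2, PySem.Chars.upperChar, PySem.Chars.islower]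
  · by_cases h2 : 'A' ≤ c ∧ c ≤ 'Z'
    · simp [h1, h2, PySem.Chars.lowerChar, PySem.Chars.isupper]
    · simp [h1, h2]

-- ===== VERDICT (by name: the statement is the Claim_ definition above) =====
theorem practical_five_spec : Claim_equal_practical_five := by
  intro s style _
  unfold Spec_practical_five practical_five practical_five_alt
  split_ifs with h1 h2 h3 h4
  · -- 'C'
    rw [PySem.List.foldl_append_singleton_eq_map]
    simp only [List.nil_append, PySem.Str.upper, PySem.Chars.upper, pv_upperChar_eq]
  · -- 'L'
    rw [PySem.List.foldl_append_singleton_eq_map]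
    simp only [List.nil_append, PySem.Str.lower, PySem.Chars.lower, pv_lowerChar_eq]
  · -- 'R'
    rw [PySem.List.foldl_append_singleton_eq_map]
    simp only [List.nil_append, pv_swapChar_eq]
  · -- 'U'
    rw [PySem.List.enumerate_eq_map_pyRange s.toList ' ',
      PySem.List.foldl_append_singleton_eq_map]
    simp only [List.nil_append, List.map_map]
    apply congrArg
    apply List.map_congr_left
    intro i _
    by_cases he : i % 2 = 0 <;>
      simp [he, Function.comp, pv_upperChar_eq, pv_lowerChar_eq]
  · rfl
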